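-- pv_equiv track=rewrite | github.com/mdn/kuma | kuma/core/managers.py | parse_tag_namespaces
-- ===== SOURCE A (Python) =====
-- def parse_tag_namespaces(tag_list):
--     """Parse a list of tags out into a dict of lists by namespace"""
--     namespaces = {}
--     for tag in tag_list:
--         ns = (':' in tag) and ('%s:' % tag.rsplit(':', 1)[0]) or ''
--         if ns not in namespaces:
--             namespaces[ns] = []
--         namespaces[ns].append(tag)
--     return namespaces
-- ===== SOURCE B (Python) =====
-- def parse_tag_namespaces(tag_list):
--     """Parse a list of tags out into a dict of lists by namespace"""
--     def ns(tag):
--         return tag.rsplit(':', 1)[0] + ':' if ':' in tag else ''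
--     keys = list(dict.fromkeys(ns(tag) for tag in tag_list))
--     return {k: [tag for tag in tag_list if ns(tag) == k] for k in keys}
-- ===== Notes on version B (the rewrite author's own statement) =====
-- stated objective: idiomatic
-- what changed: A accumulates tags into a dict in one pass (create-key-then-append); B first computes the namespace keys in first-occurrence order via dict.fromkeys and then builds each group with a per-key filter comprehension, so no mutable accumulator is threaded through the loop.
import Mathlib
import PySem

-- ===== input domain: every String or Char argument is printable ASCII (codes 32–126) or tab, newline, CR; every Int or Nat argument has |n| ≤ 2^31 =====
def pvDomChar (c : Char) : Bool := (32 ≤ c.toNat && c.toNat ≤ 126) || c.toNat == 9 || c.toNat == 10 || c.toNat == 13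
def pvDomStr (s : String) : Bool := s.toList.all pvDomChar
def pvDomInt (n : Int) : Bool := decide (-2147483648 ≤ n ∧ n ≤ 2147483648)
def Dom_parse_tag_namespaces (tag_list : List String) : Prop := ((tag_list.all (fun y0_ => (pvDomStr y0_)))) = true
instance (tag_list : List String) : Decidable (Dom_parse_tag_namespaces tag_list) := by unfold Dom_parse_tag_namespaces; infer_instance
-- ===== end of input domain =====

-- B replaces A's one-pass mutable dict accumulation by "collect namespace keys in first-occurrence
-- order, then filter the list once per key" (idiomatic, no accumulator; not claimed faster).

-- tag.rsplit(':', 1)[0], hand-ported (no PySem rsplit): with at most one split from the right,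
-- the first piece is everything before the LAST ':' when one exists, else the whole string — exact.
def pvRsplitColon1First (cs : List Char) : List Char :=
  let i := PySem.Chars.rfind cs [':']
  if i < 0 then cs else cs.take i.toNat

-- the namespace key both Pythons compute for a tag:
-- A: (':' in tag) and ('%s:' % tag.rsplit(':', 1)[0]) or ''   (the middle operand ends in ':', hence truthy, so and/or = if/else — exact)
-- B: tag.rsplit(':', 1)[0] + ':' if ':' in tag else ''
def pvNs (tag : String) : String :=
  if PySem.Str.isIn ":" tag then String.ofList (pvRsplitColon1First tag.toList ++ [':']) else ""

-- ===== PORT A =====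
def parse_tag_namespaces (tag_list : List String) : List (String × List String) :=
  (tag_list.foldl
    (fun (namespaces : PySem.Dict String (List String)) tag =>
      let ns := pvNs tag
      let namespaces := if namespaces.contains ns then namespaces else namespaces.insert ns []
      namespaces.modify ns [] (· ++ [tag]))
    PySem.Dict.empty).items

-- ===== PORT B =====
def parse_tag_namespaces_alt (tag_list : List String) : List (String × List String) :=
  let keys := PySem.List.dedup (tag_list.map pvNs)
  -- dict comprehension over the (distinct) keys
  keys.map (fun k => (k, tag_list.filter (fun tag => pvNs tag == k)))

-- ===== PRECONDITION & SPEC =====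
def Spec_parse_tag_namespaces (tag_list : List String) (out : List (String × List String)) : Prop := out = parse_tag_namespaces_alt tag_list
instance (tag_list : List String) (out : List (String × List String)) : Decidable (Spec_parse_tag_namespaces tag_list out) := by unfold Spec_parse_tag_namespaces; infer_instance

-- ===== CLAIM (what is proved, stated in full; the proofs are below) =====
def Claim_equal_parse_tag_namespaces : Prop := ∀ (tag_list : List String), Dom_parse_tag_namespaces tag_list → Spec_parse_tag_namespaces tag_list (parse_tag_namespaces tag_list)

-- ===== LEMMAS AND PROOFS =====

-- A's loop body, named for the lemmas
def pvStep (d : PySem.Dict String (List String)) (tag : String) : PySem.Dict String (List String) :=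
  (if d.contains (pvNs tag) then d else d.insert (pvNs tag) []).modify (pvNs tag) [] (· ++ [tag])

theorem pvContains_keys (d : PySem.Dict String (List String)) (k : String) :
    PySem.Set.contains d.keys k = d.contains k := by
  rw [PySem.Dict.contains_eq_decide_mem_keys]
  simp [PySem.Set.contains]

theorem pvStep_keys (d : PySem.Dict String (List String)) (tag : String) :
    (pvStep d tag).keys = PySem.Set.add d.keys (pvNs tag) := by
  unfold pvStep PySem.Set.add
  rw [pvContains_keys]
  by_cases h : d.contains (pvNs tag) = true
  · rw [if_pos h, if_pos h, PySem.Dict.keys_modify,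
      PySem.Dict.keys_insert_of_contains _ _ h]
  · rw [if_neg h, if_neg h, PySem.Dict.keys_modify,
      PySem.Dict.keys_insert_of_contains _ _ (PySem.Dict.contains_insert_self _ _ _),
      PySem.Dict.keys_insert_of_not_contains _ _ (by simpa using h)]

theorem pvStep_getD (d : PySem.Dict String (List String)) (tag k : String) :
    (pvStep d tag).getD k [] = d.getD k [] ++ (if pvNs tag == k then [tag] else []) := by
  unfold pvStep
  by_cases hk : k = pvNs tag
  · rw [hk, beq_self_eq_true, if_pos rfl]
    by_cases h : d.contains (pvNs tag) = true
    · rw [if_pos h, PySem.Dict.getD_modify, if_pos rfl]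
    · rw [if_neg h, PySem.Dict.getD_modify, if_pos rfl, PySem.Dict.getD_insert_self,
        PySem.Dict.getD_of_not_contains d [] (by simpa using h)]
  · have hb : (pvNs tag == k) = false := by simpa using fun h' => hk h'.symm
    rw [hb]
    simp only [Bool.false_eq_true, if_false, List.append_nil]
    by_cases h : d.contains (pvNs tag) = true
    · rw [if_pos h, PySem.Dict.getD_modify, if_neg hk]
    · rw [if_neg h, PySem.Dict.getD_modify, if_neg hk, PySem.Dict.getD_insert_of_ne d [] [] hk]

theorem pvFold_keys (xs : List String) (d : PySem.Dict String (List String)) :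
    (xs.foldl pvStep d).keys = PySem.Set.update d.keys (xs.map pvNs) := by
  induction xs generalizing d with
  | nil => simp [PySem.Set.update]
  | cons x xs ih =>
      simp only [List.foldl_cons, List.map_cons, PySem.Set.update, List.foldl_cons]
      rw [ih, pvStep_keys]
      rfl

theorem pvFold_nodup (xs : List String) (d : PySem.Dict String (List String))
    (h : d.keys.Nodup) : (xs.foldl pvStep d).keys.Nodup := by
  induction xs generalizing d with
  | nil => exact h
  | cons x xs ih =>
      refine ih _ ?_
      rw [pvStep_keys]
      unfold PySem.Set.add
      split
      · exact h
      · next hc =>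
        refine List.Nodup.append h (List.nodup_singleton _) ?_
        intro a ha hb
        simp only [List.mem_singleton] at hb
        subst hb
        exact absurd (by simpa [PySem.Set.contains] using ha) (by simpa using hc)

theorem pvFold_getD (xs : List String) (d : PySem.Dict String (List String)) (k : String) :
    (xs.foldl pvStep d).getD k [] = d.getD k [] ++ xs.filter (fun t => pvNs t == k) := by
  induction xs generalizing d with
  | nil => simp
  | cons x xs ih =>
      simp only [List.foldl_cons, List.filter_cons]
      rw [ih, pvStep_getD]
      by_cases h : (pvNs x == k) = true
      · simp [h]
      · simp only [Bool.not_eq_true] at h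
        simp [h]

-- ===== VERDICT (by name: the statement is the Claim_ definition above) =====
theorem parse_tag_namespaces_spec : Claim_equal_parse_tag_namespaces := by
  intro tag_list _
  show parse_tag_namespaces tag_list = parse_tag_namespaces_alt tag_list
  unfold parse_tag_namespaces parse_tag_namespaces_alt
  have hfold : ∀ (d : PySem.Dict String (List String)),
      tag_list.foldl
        (fun namespaces tag =>
          let ns := pvNs tag
          let namespaces := if namespaces.contains ns then namespaces else namespaces.insert ns []
          namespaces.modify ns [] (· ++ [tag])) d
      = tag_list.foldl pvStep d := by
    intro d; rfl
  rw [hfold]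
  have hnd : (tag_list.foldl pvStep PySem.Dict.empty).keys.Nodup :=
    pvFold_nodup _ _ (by simp [PySem.Dict.empty])
  rw [PySem.Dict.items_eq_map_keys _ hnd []]
  rw [pvFold_keys]
  have hkeys : PySem.Set.update (PySem.Dict.empty (κ := String) (ν := List String)).keys (tag_list.map pvNs)
      = PySem.List.dedup (tag_list.map pvNs) := by
    simp [PySem.Dict.empty, PySem.Set.update, PySem.List.dedup_eq_ofList, PySem.Set.ofList_eq_foldl]
  rw [hkeys]
  refine List.map_congr_left ?_
  intro k hk
  rw [pvFold_getD]
  rw [PySem.Dict.getD_empty]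
  simp
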